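-- pv_equiv track=rewrite | github.com/devpouya/GeneralizedEasyFirstParser | src/h01_data/oracle.py | has_all_children
-- ===== SOURCE A (Python) =====
-- def has_all_children(true_arcs, built_arcs, item):
--     for (u, v) in true_arcs:
--         if u == item:
--             if (u, v) in built_arcs.values():
--                 continue
--             else:
--                 return False
--         else:
--             continue
--     return True
-- ===== SOURCE B (Python) =====
-- def has_all_children(true_arcs, built_arcs, item):
--     remaining = [(u, v) for (u, v) in true_arcs if u == item]
--     for arc in built_arcs.values():
--         remaining = [p for p in remaining if p != arc]
--     return not remaining
-- ===== Notes on version B (the rewrite author's own statement) =====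
-- stated objective: alternative
-- what changed: Inverts the traversal: instead of scanning built_arcs.values() for each true arc with early return, B collects the needed arcs once and then iterates over the built arc values, eliminating satisfied arcs from the needed list, returning whether the list is exhausted.
import Mathlib
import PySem

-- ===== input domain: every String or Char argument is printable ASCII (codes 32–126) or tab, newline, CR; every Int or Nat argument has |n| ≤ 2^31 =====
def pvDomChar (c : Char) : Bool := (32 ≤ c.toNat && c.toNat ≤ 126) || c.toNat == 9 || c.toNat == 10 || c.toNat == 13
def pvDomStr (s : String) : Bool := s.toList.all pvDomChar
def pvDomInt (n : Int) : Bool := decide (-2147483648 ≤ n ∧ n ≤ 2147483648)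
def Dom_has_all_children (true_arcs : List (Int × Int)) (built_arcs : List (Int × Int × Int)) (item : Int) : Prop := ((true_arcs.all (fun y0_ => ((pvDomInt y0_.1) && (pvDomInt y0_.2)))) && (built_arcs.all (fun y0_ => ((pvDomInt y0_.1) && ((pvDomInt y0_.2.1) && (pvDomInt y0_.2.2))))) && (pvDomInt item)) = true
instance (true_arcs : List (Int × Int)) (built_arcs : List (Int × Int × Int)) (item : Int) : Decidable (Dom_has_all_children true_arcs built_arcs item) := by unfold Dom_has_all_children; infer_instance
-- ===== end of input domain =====

-- B inverts the traversal: it collects the needed arcs once, then iterates over the built arc values eliminating satisfied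
-- arcs from that list, returning whether the list is exhausted — an alternative decomposition, same cost.


-- ===== PORT A =====
def has_all_children (true_arcs : List (Int × Int)) (built_arcs : List (Int × Int × Int)) (item : Int) : Bool :=
  match true_arcs with
  | [] => true
  | (u, v) :: rest =>
    if u == item then
      if (PySem.Dict.ofList built_arcs).values.contains (u, v) then
        has_all_children rest built_arcs item
      else
        false
    else
      has_all_children rest built_arcs item

-- ===== PORT B =====
def has_all_children_alt (true_arcs : List (Int × Int)) (built_arcs : List (Int × Int × Int)) (item : Int) : Bool :=
  let remaining := true_arcs.filter (fun p => p.1 == item)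
  let remaining := (PySem.Dict.ofList built_arcs).values.foldl
    (fun rem arc => rem.filter (fun p => p != arc)) remaining
  remaining.isEmpty

-- ===== PRECONDITION & SPEC =====
def Spec_has_all_children (true_arcs : List (Int × Int)) (built_arcs : List (Int × Int × Int)) (item : Int) (out : Bool) : Prop := out = has_all_children_alt true_arcs built_arcs item
instance (true_arcs : List (Int × Int)) (built_arcs : List (Int × Int × Int)) (item : Int) (out : Bool) : Decidable (Spec_has_all_children true_arcs built_arcs item out) := by unfold Spec_has_all_children; infer_instance

-- ===== CLAIM (what is proved, stated in full; the proofs are below) =====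
def Claim_equal_has_all_children : Prop := ∀ (true_arcs : List (Int × Int)) (built_arcs : List (Int × Int × Int)) (item : Int), Dom_has_all_children true_arcs built_arcs item → Spec_has_all_children true_arcs built_arcs item (has_all_children true_arcs built_arcs item)

-- ===== LEMMAS AND PROOFS =====

-- Iterated elimination over the built values is filtering by non-membership.
lemma foldl_filter_eq (arcs : List (Int × Int)) (l : List (Int × Int)) :
    arcs.foldl (fun rem arc => rem.filter (fun p => p != arc)) l
      = l.filter (fun p => !arcs.contains p) := by
  induction arcs generalizing l with
  | nil => simp
  | cons a tl ih =>
    simp only [List.foldl_cons, ih, List.filter_filter]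
    congr 1
    funext p
    by_cases h : p = a <;> simp [h]

lemma portA_true_iff (true_arcs : List (Int × Int)) (built_arcs : List (Int × Int × Int)) (item : Int) :
    has_all_children true_arcs built_arcs item = true ↔
      ∀ p ∈ true_arcs, p.1 = item → p ∈ (PySem.Dict.ofList built_arcs).values := by
  induction true_arcs with
  | nil => simp [has_all_children]
  | cons hd tl ih =>
    obtain ⟨u, v⟩ := hd
    simp only [has_all_children]
    by_cases hu : u = item
    · subst hu
      by_cases hm : (u, v) ∈ (PySem.Dict.ofList built_arcs).values
      · simp [hm, ih]
      · simp [hm]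
    · simp [hu, ih]

lemma portB_true_iff (true_arcs : List (Int × Int)) (built_arcs : List (Int × Int × Int)) (item : Int) :
    has_all_children_alt true_arcs built_arcs item = true ↔
      ∀ p ∈ true_arcs, p.1 = item → p ∈ (PySem.Dict.ofList built_arcs).values := by
  simp only [has_all_children_alt, foldl_filter_eq, List.isEmpty_iff,
    List.filter_eq_nil_iff, List.mem_filter]
  constructor
  · intro h p hp hpi
    have := h p ⟨hp, by simpa using hpi⟩
    simpa using this
  · intro h p hp
    simpa using h p hp.1 (by simpa using hp.2)

-- ===== VERDICT (by name: the statement is the Claim_ definition above) =====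
theorem has_all_children_spec : Claim_equal_has_all_children := by
  intro ta ba it _
  unfold Spec_has_all_children
  rw [Bool.eq_iff_iff, portA_true_iff, portB_true_iff]
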